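/-
  The named simp set of the arena layer (a simp attribute must be declared in a module imported by the one that uses it).

      @[varena]   the fields of the arena after a transition, as rewrite rules:
                  `(A.pushSetup n).S = A.S + 32 + r8 n`, `(A.pushTemp n).temps = (A.T - (r8 n + 32), n) :: A.temps`,
                  `(A.withTemp T' keep).T = T'` …   (Vorbis/Arena.lean).  `simp only [varena]` normalises a goal about the new arena
                  to the old arena's fields; then `omega` (with `r8_def`, `r8_mod`, `le_r8` as needed).
-/
import Lean

/-- The fields of `A.pushSetup n`, `A.pushTemp n`, `A.withTemp T' keep` in terms of `A`'s (`simp only [varena]`). -/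
register_simp_attr varena
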